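-- pv_equiv track=rewrite | github.com/samodostal/AOC | 2023/12/12.py | counts_correspond_to_template_partialy
-- ===== SOURCE A (Python) =====
-- def counts_correspond_to_template_partialy(template, counts):
--     template_counts = []
--     current_count = 0
--
--     for ch in template:
--         if ch == "#":
--             current_count += 1
--         elif current_count != 0:
--             template_counts.append(current_count)
--             current_count = 0
--
--     if current_count != 0:
--         template_counts.append(current_count)
--
--     if max(template_counts, default=0) > max(counts, default=0):
--         return False
--
--     return True
-- ===== SOURCE B (Python) =====
-- def counts_correspond_to_template_partialy(template, counts):
--     best = cur = 0
--     for ch in template: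
--         cur = cur + 1 if ch == "#" else 0
--         if cur > best:
--             best = cur
--     return best <= max(counts, default=0)
-- ===== Notes on version B (the rewrite author's own statement) =====
-- stated objective: simpler
-- what changed: Replaces the state machine that appends completed run lengths to an intermediate list (with a post-loop flush) and then takes its max, by a single running-maximum accumulator updated in place, returning best <= max(counts, default=0) directly.
import Mathlib
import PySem

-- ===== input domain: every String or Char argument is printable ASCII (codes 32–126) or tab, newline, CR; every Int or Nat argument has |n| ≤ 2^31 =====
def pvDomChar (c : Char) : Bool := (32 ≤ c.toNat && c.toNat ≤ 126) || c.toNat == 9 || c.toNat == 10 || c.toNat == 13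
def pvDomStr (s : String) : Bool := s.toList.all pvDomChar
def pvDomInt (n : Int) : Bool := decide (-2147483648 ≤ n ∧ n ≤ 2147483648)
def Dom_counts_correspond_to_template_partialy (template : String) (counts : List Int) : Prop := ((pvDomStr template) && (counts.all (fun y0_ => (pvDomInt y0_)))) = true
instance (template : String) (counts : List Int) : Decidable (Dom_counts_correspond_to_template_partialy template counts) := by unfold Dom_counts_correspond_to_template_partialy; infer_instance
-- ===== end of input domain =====

-- B replaces A's run-length list + post-loop flush by a single running-maximum accumulator (simpler; same cost).

-- shared helper: Python's max(xs, default=0)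
def pyMaxD0 (xs : List Int) : Int := (PySem.List.max? xs (fun y => y)).getD 0

-- ===== PORT A =====
-- A's loop state: (template_counts, current_count)
def stepA (st : List Int × Int) (ch : Char) : List Int × Int :=
  if ch == '#' then (st.1, st.2 + 1)
  else if st.2 ≠ 0 then (st.1 ++ [st.2], 0)
  else st

def counts_correspond_to_template_partialy (template : String) (counts : List Int) : Bool :=
  let st := template.toList.foldl stepA ([], 0)
  let tc := if st.2 ≠ 0 then st.1 ++ [st.2] else st.1
  if pyMaxD0 tc > pyMaxD0 counts then false else true

-- ===== PORT B =====
-- B's loop state: (best, cur)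
def stepB (st : Int × Int) (ch : Char) : Int × Int :=
  let cur := if ch == '#' then st.2 + 1 else 0
  (if cur > st.1 then cur else st.1, cur)

def counts_correspond_to_template_partialy_alt (template : String) (counts : List Int) : Bool :=
  let st := template.toList.foldl stepB (0, 0)
  decide (st.1 ≤ pyMaxD0 counts)

-- ===== PRECONDITION & SPEC =====
def Spec_counts_correspond_to_template_partialy (template : String) (counts : List Int) (out : Bool) : Prop := out = counts_correspond_to_template_partialy_alt template counts
instance (template : String) (counts : List Int) (out : Bool) : Decidable (Spec_counts_correspond_to_template_partialy template counts out) := by unfold Spec_counts_correspond_to_template_partialy; infer_instance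

-- ===== CLAIM (what is proved, stated in full; the proofs are below) =====
def Claim_equal_counts_correspond_to_template_partialy : Prop := ∀ (template : String) (counts : List Int), Dom_counts_correspond_to_template_partialy template counts → Spec_counts_correspond_to_template_partialy template counts (counts_correspond_to_template_partialy template counts)

-- ===== LEMMAS AND PROOFS =====

theorem pyMaxD0_append (l : List Int) (x : Int) (hx : 0 ≤ x) :
    pyMaxD0 (l ++ [x]) = max (pyMaxD0 l) x := by
  cases l with
  | nil =>
      have hn : PySem.List.max? ([] : List Int) (fun y => y) = none := by
        rw [PySem.List.max?_eq_none_iff]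
      simp [pyMaxD0, PySem.List.max?_id_cons, List.foldl, hn]
      omega
  | cons h t =>
      simp [pyMaxD0, PySem.List.max?_id_cons, List.foldl_append, List.foldl]

-- the relation between A's and B's loop states
def StRel (a : List Int × Int) (b : Int × Int) : Prop :=
  b.2 = a.2 ∧ b.1 = max (pyMaxD0 a.1) a.2 ∧ 0 ≤ a.2 ∧ 0 ≤ pyMaxD0 a.1

theorem StRel_step (a : List Int × Int) (b : Int × Int) (c : Char) (h : StRel a b) :
    StRel (stepA a c) (stepB b c) := by
  obtain ⟨h1, h2, h3, h4⟩ := h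
  by_cases hc : c = '#'
  · refine ⟨?_, ?_, ?_, ?_⟩ <;> simp [stepA, stepB, hc, h1, h2] <;> omega
  · by_cases hz : a.2 ≠ 0
    · have hm := pyMaxD0_append a.1 a.2 h3
      refine ⟨?_, ?_, ?_, ?_⟩ <;> simp [stepA, stepB, hc, hz, h2, hm] <;> omega
    · refine ⟨?_, ?_, ?_, ?_⟩ <;> simp [stepA, stepB, hc, hz, h2] <;> omega

theorem StRel_foldl (l : List Char) (a : List Int × Int) (b : Int × Int) (h : StRel a b) :
    StRel (l.foldl stepA a) (l.foldl stepB b) := by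
  induction l generalizing a b with
  | nil => exact h
  | cons c t ih => exact ih _ _ (StRel_step a b c h)

-- ===== VERDICT (by name: the statement is the Claim_ definition above) =====
theorem counts_correspond_to_template_partialy_spec : Claim_equal_counts_correspond_to_template_partialy := by
  intro template counts _
  unfold Spec_counts_correspond_to_template_partialy
  unfold counts_correspond_to_template_partialy counts_correspond_to_template_partialy_alt
  have h0 : StRel ([], 0) ((0 : Int), (0 : Int)) := by
    have hn : PySem.List.max? ([] : List Int) (fun y => y) = none := by
      rw [PySem.List.max?_eq_none_iff]
    refine ⟨rfl, ?_, le_refl _, ?_⟩ <;> simp [pyMaxD0, hn]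
  have h := StRel_foldl template.toList ([], 0) (0, 0) h0
  set sA := template.toList.foldl stepA ([], 0) with hsA
  set sB := template.toList.foldl stepB (0, 0) with hsB
  obtain ⟨h1, h2, h3, h4⟩ := h
  have hmax : pyMaxD0 (if sA.2 ≠ 0 then sA.1 ++ [sA.2] else sA.1) = sB.1 := by
    by_cases hz : sA.2 ≠ 0
    · rw [if_pos hz, pyMaxD0_append sA.1 sA.2 h3, h2]
    · rw [if_neg hz]
      have hz0 : sA.2 = 0 := by exact not_not.mp hz
      rw [h2, hz0]
      omega
  show (if pyMaxD0 (if sA.2 ≠ 0 then sA.1 ++ [sA.2] else sA.1) > pyMaxD0 counts then false else true)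
      = decide (sB.1 ≤ pyMaxD0 counts)
  rw [hmax]
  by_cases hle : sB.1 ≤ pyMaxD0 counts
  · simp [hle]
  · simp [hle]; omega
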